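-- pv_equiv track=rewrite | github.com/guixiong793261/zeri-app-v1 | 择日模块测试/核心模块/公式计算四柱.py | _get_month_simplified
-- ===== SOURCE A (Python) =====
-- def _get_month_simplified(month, day):
--     """
--     简化的月份计算（当精确节气数据不可用时使用）
--
--     Args:
--         month: 公历月份
--         day: 日期
--
--     Returns:
--         int: 农历月份
--     """
--     # 简化的节气日期（近似值）
--     # 格式：(节气月份, 节气日期, 对应农历月份)
--     jie_qi_info = [
--         (1, 6, 12),   # 小寒在1月6日左右，对应农历十二月
--         (2, 4, 1),    # 立春在2月4日左右，对应农历正月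
--         (3, 6, 2),    # 惊蛰在3月6日左右，对应农历二月
--         (4, 5, 3),    # 清明在4月5日左右，对应农历三月
--         (5, 6, 4),    # 立夏在5月6日左右，对应农历四月
--         (6, 6, 5),    # 芒种在6月6日左右，对应农历五月
--         (7, 7, 6),    # 小暑在7月7日左右，对应农历六月
--         (8, 8, 7),    # 立秋在8月8日左右，对应农历七月
--         (9, 8, 8),    # 白露在9月8日左右，对应农历八月
--         (10, 8, 9),   # 寒露在10月8日左右，对应农历九月
--         (11, 7, 10),  # 立冬在11月7日左右，对应农历十月
--         (12, 7, 11)   # 大雪在12月7日左右，对应农历十一月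
--     ]
--
--     # 找到当前月份的节气
--     for i, (jq_month, jq_day, lunar_month) in enumerate(jie_qi_info):
--         if jq_month == month:
--             if day >= jq_day:
--                 return lunar_month
--             else:
--                 # 未到节气，返回前一个月
--                 if i == 0:
--                     return 11  # 小寒前是农历十一月
--                 else:
--                     prev_jq_month, prev_jq_day, prev_lunar_month = jie_qi_info[i-1]
--                     return prev_lunar_month
--
--     return month
-- ===== SOURCE B (Python) =====
-- _THRESHOLD = {1: 6, 2: 4, 3: 6, 4: 5, 5: 6, 6: 6, 7: 7, 8: 8, 9: 8, 10: 8, 11: 7, 12: 7}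
--
-- def _get_month_simplified(month, day):
--     t = _THRESHOLD.get(month)
--     if t is None:
--         return month
--     if day >= t:
--         return (month + 10) % 12 + 1
--     return (month + 9) % 12 + 1
-- ===== Notes on version B (the rewrite author's own statement) =====
-- stated objective: simpler
-- what changed: Replaced the 12-row (month, term-day, lunar-month) table, its enumerate scan and the i-1 previous-entry lookup by a month->threshold dict plus two closed-form modular expressions (month+10)%12+1 / (month+9)%12+1 that compute the lunar month and its predecessor arithmetically.
import Mathlib
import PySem

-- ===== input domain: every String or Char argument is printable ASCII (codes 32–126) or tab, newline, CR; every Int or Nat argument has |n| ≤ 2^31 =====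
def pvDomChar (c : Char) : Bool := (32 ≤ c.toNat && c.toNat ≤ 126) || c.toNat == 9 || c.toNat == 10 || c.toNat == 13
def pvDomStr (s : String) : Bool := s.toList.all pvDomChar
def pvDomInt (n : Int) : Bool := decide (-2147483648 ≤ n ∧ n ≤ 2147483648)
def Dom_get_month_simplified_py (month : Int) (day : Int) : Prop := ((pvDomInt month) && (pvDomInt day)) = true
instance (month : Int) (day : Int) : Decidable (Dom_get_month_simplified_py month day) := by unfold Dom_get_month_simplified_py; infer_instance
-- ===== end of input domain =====

-- B replaces the 12-row table scan and the i-1 previous-entry lookup with a threshold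
-- dict and two closed-form modular expressions (objective: simpler).

-- ===== PORT A =====
-- the 12-entry solar-term table of A
def pvJieQiInfo : List (Int × Int × Int) :=
  [(1, 6, 12), (2, 4, 1), (3, 6, 2), (4, 5, 3), (5, 6, 4), (6, 6, 5),
   (7, 7, 6), (8, 8, 7), (9, 8, 8), (10, 8, 9), (11, 7, 10), (12, 7, 11)]

-- the 'for i, (...) in enumerate(jie_qi_info)' loop; carries the index i
def pvALoop (month : Int) (day : Int) : List (Int × Int × Int) → Nat → Int
  | [], _ => month                                     -- fell through: 'return month'
  | (jqMonth, jqDay, lunarMonth) :: rest, i =>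
    if jqMonth = month then
      if day ≥ jqDay then lunarMonth
      else if i = 0 then 11
      else ((PySem.List.pyGet? pvJieQiInfo ((i : Int) - 1)).elim 0 (fun t => t.2.2))
           -- jie_qi_info[i-1]; always in range when reached, .elim 0 is the unreachable none case
    else pvALoop month day rest (i + 1)

def get_month_simplified_py (month : Int) (day : Int) : Int :=
  pvALoop month day pvJieQiInfo 0

-- ===== PORT B =====
def pvThreshold : PySem.Dict Int Int :=
  PySem.Dict.ofList [(1, 6), (2, 4), (3, 6), (4, 5), (5, 6), (6, 6),
                     (7, 7), (8, 8), (9, 8), (10, 8), (11, 7), (12, 7)]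

def get_month_simplified_py_alt (month : Int) (day : Int) : Int :=
  match PySem.Dict.get? pvThreshold month with
  | none => month
  | some t =>
    if day ≥ t then PySem.Int.mod (month + 10) 12 + 1
    else PySem.Int.mod (month + 9) 12 + 1

-- ===== PRECONDITION & SPEC =====
def Spec_get_month_simplified_py (month : Int) (day : Int) (out : Int) : Prop := out = get_month_simplified_py_alt month day
instance (month : Int) (day : Int) (out : Int) : Decidable (Spec_get_month_simplified_py month day out) := by unfold Spec_get_month_simplified_py; infer_instance

-- ===== CLAIM (what is proved, stated in full; the proofs are below) =====
def Claim_equal_get_month_simplified_py : Prop := ∀ (month : Int) (day : Int), Dom_get_month_simplified_py month day → Spec_get_month_simplified_py month day (get_month_simplified_py month day)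

-- ===== LEMMAS AND PROOFS =====

-- ===== VERDICT (by name: the statement is the Claim_ definition above) =====
theorem get_month_simplified_py_spec : Claim_equal_get_month_simplified_py := by
  intro m d _
  unfold Spec_get_month_simplified_py
  by_cases h1 : m = 1
  · subst h1
    have hg : pvThreshold.get? 1 = some 6 := by decide
    simp [get_month_simplified_py, get_month_simplified_py_alt, pvALoop, pvJieQiInfo, hg]
  by_cases h2 : m = 2
  · subst h2
    have hg : pvThreshold.get? 2 = some 4 := by decide
    simp [get_month_simplified_py, get_month_simplified_py_alt, pvALoop, pvJieQiInfo, hg]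
  by_cases h3 : m = 3
  · subst h3
    have hg : pvThreshold.get? 3 = some 6 := by decide
    simp [get_month_simplified_py, get_month_simplified_py_alt, pvALoop, pvJieQiInfo, hg]
  by_cases h4 : m = 4
  · subst h4
    have hg : pvThreshold.get? 4 = some 5 := by decide
    simp [get_month_simplified_py, get_month_simplified_py_alt, pvALoop, pvJieQiInfo, hg]
  by_cases h5 : m = 5
  · subst h5
    have hg : pvThreshold.get? 5 = some 6 := by decide
    simp [get_month_simplified_py, get_month_simplified_py_alt, pvALoop, pvJieQiInfo, hg]
  by_cases h6 : m = 6
  · subst h6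
    have hg : pvThreshold.get? 6 = some 6 := by decide
    simp [get_month_simplified_py, get_month_simplified_py_alt, pvALoop, pvJieQiInfo, hg]
  by_cases h7 : m = 7
  · subst h7
    have hg : pvThreshold.get? 7 = some 7 := by decide
    simp [get_month_simplified_py, get_month_simplified_py_alt, pvALoop, pvJieQiInfo, hg]
  by_cases h8 : m = 8
  · subst h8
    have hg : pvThreshold.get? 8 = some 8 := by decide
    simp [get_month_simplified_py, get_month_simplified_py_alt, pvALoop, pvJieQiInfo, hg]
  by_cases h9 : m = 9
  · subst h9
    have hg : pvThreshold.get? 9 = some 8 := by decide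
    simp [get_month_simplified_py, get_month_simplified_py_alt, pvALoop, pvJieQiInfo, hg]
  by_cases h10 : m = 10
  · subst h10
    have hg : pvThreshold.get? 10 = some 8 := by decide
    simp [get_month_simplified_py, get_month_simplified_py_alt, pvALoop, pvJieQiInfo, hg]
  by_cases h11 : m = 11
  · subst h11
    have hg : pvThreshold.get? 11 = some 7 := by decide
    simp [get_month_simplified_py, get_month_simplified_py_alt, pvALoop, pvJieQiInfo, hg]
  by_cases h12 : m = 12
  · subst h12
    have hg : pvThreshold.get? 12 = some 7 := by decide
    simp [get_month_simplified_py, get_month_simplified_py_alt, pvALoop, pvJieQiInfo, hg]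
  have hT : pvThreshold = PySem.Dict.mk [(1, 6), (2, 4), (3, 6), (4, 5), (5, 6), (6, 6),
      (7, 7), (8, 8), (9, 8), (10, 8), (11, 7), (12, 7)] := by decide
  simp [get_month_simplified_py, get_month_simplified_py_alt, pvALoop, pvJieQiInfo, hT,
        PySem.Dict.get?_mk_cons, PySem.Dict.get?,
        Ne.symm h1, Ne.symm h2, Ne.symm h3, Ne.symm h4, Ne.symm h5, Ne.symm h6,
        Ne.symm h7, Ne.symm h8, Ne.symm h9, Ne.symm h10, Ne.symm h11, Ne.symm h12]
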